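-- pv_equiv track=rewrite | github.com/kksusa/PTHN_DP_SMNR_2 | task_1.py | show_hex
-- ===== SOURCE A (Python) =====
-- def show_hex(number):
--     quotient = None
--     result = []
--     while number != 0:
--         quotient = number % 16
--         match quotient:
--             case 10:
--                 result.append("a")
--             case 11:
--                 result.append("b")
--             case 12:
--                 result.append("c")
--             case 13:
--                 result.append("d")
--             case 14:
--                 result.append("e")
--             case 15:
--                 result.append("f")
--             case _:
--                 result.append(str(quotient))
--         number //= 16
--     return result
-- ===== SOURCE B (Python) =====
-- def show_hex(number):
--     if number == 0:
--         return []
--     return list(reversed(format(number, 'x')))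
-- ===== Notes on version B (the rewrite author's own statement) =====
-- stated objective: idiomatic
-- what changed: Replaces the manual repeated-division loop with match statement by a single built-in hex conversion format(number,'x') followed by a reversal, with an early empty-list return matching the loop that never runs.
-- outside the precondition, e.g. on show_hex(-1): A does not finish within the time limit, B returns ['1', '-']
import Mathlib
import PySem

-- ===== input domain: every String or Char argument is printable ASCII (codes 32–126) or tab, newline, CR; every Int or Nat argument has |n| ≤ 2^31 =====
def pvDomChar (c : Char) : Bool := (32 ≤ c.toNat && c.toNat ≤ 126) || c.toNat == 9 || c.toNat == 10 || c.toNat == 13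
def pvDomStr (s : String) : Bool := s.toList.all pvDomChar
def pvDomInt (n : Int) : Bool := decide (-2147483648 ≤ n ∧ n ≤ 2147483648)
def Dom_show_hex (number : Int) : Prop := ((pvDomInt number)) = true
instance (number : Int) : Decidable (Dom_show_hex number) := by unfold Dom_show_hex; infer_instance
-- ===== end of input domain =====

-- B replaces A's repeated-division loop + match by the built-in hex conversion (format(number,'x')) reversed; idiomatic, same cost.

-- ===== PORT A =====
-- the match statement of A, as a helper (same cases, same order)
def showHexDigit (quotient : Int) : String :=
  if quotient = 10 then "a"
  else if quotient = 11 then "b"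
  else if quotient = 12 then "c"
  else if quotient = 13 then "d"
  else if quotient = 14 then "e"
  else if quotient = 15 then "f"
  else PySem.Int.toStr quotient

-- A's while loop; fuel only makes it total (Python diverges for number < 0, excluded by Pre_)
def showHexLoop : Nat → Int → List String → List String
  | 0, _, result => result
  | fuel + 1, number, result =>
    if number = 0 then result
    else
      let quotient := PySem.Int.mod number 16
      showHexLoop fuel (PySem.Int.floordiv number 16) (result ++ [showHexDigit quotient])

def show_hex (number : Int) : List String := showHexLoop number.toNat number []

-- ===== PORT B =====
-- format(number,'x') for number > 0: most-significant-first lowercase hex chars (exact port of the library conversion)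
def hexChars (n : Nat) : List Char :=
  if h : n = 0 then [] else hexChars (n / 16) ++ [Nat.digitChar (n % 16)]
decreasing_by exact Nat.div_lt_self (Nat.pos_of_ne_zero h) (by omega)

def show_hex_alt (number : Int) : List String :=
  if number = 0 then []
  else (hexChars number.toNat).reverse.map (fun c => String.mk [c])

-- ===== PRECONDITION & SPEC =====
-- Pre_ excludes number < 0: there A's while loop never terminates (number //= 16 stabilises at -1), so A returns no value.
def Pre_show_hex (number : Int) : Prop := 0 ≤ number
instance (number : Int) : Decidable (Pre_show_hex number) := by unfold Pre_show_hex; infer_instance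
def pvWitness_show_hex : Int := 255

def Spec_show_hex (number : Int) (out : List String) : Prop := out = show_hex_alt number
instance (number : Int) (out : List String) : Decidable (Spec_show_hex number out) := by unfold Spec_show_hex; infer_instance

-- ===== CLAIM (what is proved, stated in full; the proofs are below) =====
def Claim_equal_show_hex : Prop := ∀ (number : Int), Dom_show_hex number → Pre_show_hex number → Spec_show_hex number (show_hex number)

-- ===== LEMMAS AND PROOFS =====

lemma showHexDigit_natCast (q : Nat) (hq : q < 16) :
    showHexDigit (q : Int) = String.mk [Nat.digitChar q] := by
  interval_cases q <;> decide

lemma showHexLoop_eq (fuel : Nat) : ∀ (n : Nat) (result : List String), n ≤ fuel →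
    showHexLoop fuel (n : Int) result
      = result ++ (hexChars n).reverse.map (fun c => String.mk [c]) := by
  induction fuel with
  | zero =>
    intro n result hn
    have : n = 0 := Nat.le_zero.mp hn
    subst this
    simp [showHexLoop, hexChars]
  | succ fuel ih =>
    intro n result hn
    by_cases h0 : n = 0
    · subst h0; simp [showHexLoop, hexChars]
    · have hcast : ((n : Int) = 0) ↔ False := by simp [h0]
      rw [showHexLoop]
      simp only [hcast, if_false]
      have hm : PySem.Int.mod (n : Int) 16 = ((n % 16 : Nat) : Int) := by
        exact_mod_cast PySem.Int.mod_natCast n 16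
      have hd : PySem.Int.floordiv (n : Int) 16 = ((n / 16 : Nat) : Int) := by
        exact_mod_cast PySem.Int.floordiv_natCast n 16
      rw [hm, hd]
      rw [ih (n / 16) _ (by omega)]
      rw [showHexDigit_natCast (n % 16) (Nat.mod_lt n (by omega))]
      conv_rhs => rw [hexChars]
      simp [h0, List.append_assoc]

-- ===== VERDICT (by name: the statement is the Claim_ definition above) =====
theorem show_hex_spec : Claim_equal_show_hex := by
  intro number _ hpre
  unfold Spec_show_hex show_hex show_hex_alt
  obtain ⟨m, rfl⟩ : ∃ m : Nat, number = (m : Int) :=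
    ⟨number.toNat, (Int.toNat_of_nonneg hpre).symm⟩
  simp only [Int.toNat_natCast]
  rw [showHexLoop_eq m m [] le_rfl]
  by_cases h0 : m = 0
  · simp [h0, hexChars]
  · rw [if_neg (by exact_mod_cast h0)]
    simp
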